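-- pv_equiv track=rewrite | github.com/purvanshh/Task-Scheduler-Purvansh-Sahu-10169 | src/scheduler.py | _find_lex_cycle_from
-- ===== SOURCE A (Python) =====
-- def _find_lex_cycle_from(start, graph, cycle_nodes):
--     """DFS from start, neighbors in sorted order. Return first cycle back to start."""
--     if start in graph.get(start, set()):
--         return [start, start]
--
--     stack = [(start, [start])]
--     visited = set()
--
--     while stack:
--         node, path = stack.pop()
--         neighbors = sorted(graph.get(node, []))
--         for nb in reversed(neighbors):
--             if nb == start and len(path) > 1:
--                 return path + [start]
--             if nb in cycle_nodes and nb not in set(path):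
--                 state = (nb, tuple(path))
--                 if state not in visited:
--                     visited.add(state)
--                     stack.append((nb, path + [nb]))
--     return None
-- ===== SOURCE B (Python) =====
-- def _find_lex_cycle_from(start, graph, cycle_nodes):
--     """Recursive DFS over distinct sorted neighbors; first cycle back to start."""
--     if start in graph.get(start, set()):
--         return [start, start]
--
--     def dfs(node, path):
--         nbrs = sorted(set(graph.get(node, [])))
--         if start in nbrs and len(path) > 1:
--             return path + [start]
--         for nb in nbrs:
--             if nb in cycle_nodes and nb not in path:
--                 res = dfs(nb, path + [nb])
--                 if res is not None:
--                     return res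
--         return None
--
--     return dfs(start, [start])
-- ===== Notes on version B (the rewrite author's own statement) =====
-- stated objective: simpler
-- what changed: Replaces the explicit stack + global visited-state set of (node, path-tuple) pairs with a plain recursive DFS over the sorted distinct neighbors (sorted(set(...))), dropping the visited bookkeeping entirely since each full path is explored at most once.
import Mathlib
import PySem

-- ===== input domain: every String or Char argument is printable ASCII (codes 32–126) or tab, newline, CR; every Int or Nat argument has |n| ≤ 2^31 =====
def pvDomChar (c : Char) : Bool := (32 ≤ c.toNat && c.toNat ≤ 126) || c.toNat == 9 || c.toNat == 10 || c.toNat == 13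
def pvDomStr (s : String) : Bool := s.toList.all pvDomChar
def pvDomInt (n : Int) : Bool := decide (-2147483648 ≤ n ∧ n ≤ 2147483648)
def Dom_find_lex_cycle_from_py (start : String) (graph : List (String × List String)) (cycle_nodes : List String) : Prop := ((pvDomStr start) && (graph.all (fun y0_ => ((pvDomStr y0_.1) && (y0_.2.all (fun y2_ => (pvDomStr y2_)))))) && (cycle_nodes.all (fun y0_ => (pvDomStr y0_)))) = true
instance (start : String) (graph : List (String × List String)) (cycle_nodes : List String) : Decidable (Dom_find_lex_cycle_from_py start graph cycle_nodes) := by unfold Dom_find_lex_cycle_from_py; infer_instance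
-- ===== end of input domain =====

-- B replaces A's explicit stack + global visited set with a plain recursive DFS over sorted distinct
-- neighbors (simpler; same asymptotic cost).

-- graph.get(node, []) on the dict built from the association list (shared by both ports)
def pvAdj (graph : List (String × List String)) (node : String) : List String :=
  (PySem.Dict.ofList graph).getD node []

-- number of distinct cycle nodes / distinct nodes incl. start (used only by termination measures)
def pvC (cycle_nodes : List String) : Nat := (PySem.List.dedup cycle_nodes).length
def pvL (start : String) (cycle_nodes : List String) : Nat :=
  (PySem.List.dedup (start :: cycle_nodes)).length
def pvW (cycle_nodes : List String) : Nat := pvC cycle_nodes + 2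

lemma pvDedupCard (m : List String) : (PySem.List.dedup m).length = m.toFinset.card := by
  rw [← List.toFinset_card_of_nodup (PySem.List.nodup_dedup (xs := m))]
  congr 1
  ext x
  simp

lemma pvDedupLen {l m : List String} (hnd : l.Nodup) (hsub : ∀ x ∈ l, x ∈ m) :
    l.length ≤ (PySem.List.dedup m).length := by
  rw [pvDedupCard, ← List.toFinset_card_of_nodup hnd]
  exact Finset.card_le_card (by intro x hx; simp at hx ⊢; exact hsub x hx)

-- ===== PORT A =====
-- the `for nb in reversed(neighbors)` loop of A: Sum.inl = early `return`, Sum.inr = new (stack, visited)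
def pvScanA (start : String) (cycle_nodes : List String) (path : List String) :
    List String → List (String × List String) → PySem.Set (String × List String) →
    Sum (List String) (List (String × List String) × PySem.Set (String × List String))
  | [], stack, visited => Sum.inr (stack, visited)
  | nb :: rest, stack, visited =>
    if nb = start ∧ 1 < path.length then Sum.inl (path ++ [start])
    else if nb ∈ cycle_nodes ∧ nb ∉ path then
      if (nb, path) ∈ visited then pvScanA start cycle_nodes path rest stack visited
      else pvScanA start cycle_nodes path rest ((nb, path ++ [nb]) :: stack)
             (PySem.Set.add visited (nb, path))
    else pvScanA start cycle_nodes path rest stack visited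

-- facts about one scan, needed by pvLoopA's termination proof
lemma pvScanA_inr (start : String) (cycle_nodes path : List String) :
    ∀ (lst : List String) (stack : List (String × List String))
      (visited : PySem.Set (String × List String)) stack' visited',
      pvScanA start cycle_nodes path lst stack visited = Sum.inr (stack', visited') →
      ∃ pushed : List (String × List String),
        stack' = pushed ++ stack ∧ (pushed.map Prod.fst).Nodup ∧
        (∀ e ∈ pushed, e.1 ∈ cycle_nodes ∧ e.1 ∉ path ∧ e.2 = path ++ [e.1]) ∧
        (∀ e ∈ pushed, (e.1, path) ∉ visited) ∧
        (∀ s ∈ visited', s ∈ visited ∨ s.2 = path) := by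
  intro lst
  induction lst with
  | nil =>
    intro stack visited stack' visited' h
    simp only [pvScanA, Sum.inr.injEq, Prod.mk.injEq] at h
    exact ⟨[], by simp [h.1.symm], by simp, by simp, by simp,
      fun s hs => Or.inl (by rw [h.2]; exact hs)⟩
  | cons nb rest ih =>
    intro stack visited stack' visited' h
    simp only [pvScanA] at h
    by_cases h1 : nb = start ∧ 1 < path.length
    · rw [if_pos h1] at h; simp at h
    · rw [if_neg h1] at h
      by_cases h2 : nb ∈ cycle_nodes ∧ nb ∉ path
      swap
      · rw [if_neg h2] at h; exact ih stack visited stack' visited' h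
      rw [if_pos h2] at h
      by_cases h3 : (nb, path) ∈ visited
      · rw [if_pos h3] at h; exact ih stack visited stack' visited' h
      rw [if_neg h3] at h
      obtain ⟨pushed, hst, hnd, hprop, hvis, hvis'⟩ :=
        ih ((nb, path ++ [nb]) :: stack) (PySem.Set.add visited (nb, path)) stack' visited' h
      refine ⟨pushed ++ [(nb, path ++ [nb])], by simp [hst], ?_, ?_, ?_, ?_⟩
      · have hne : nb ∉ pushed.map Prod.fst := by
          intro hmem
          obtain ⟨e, he, hefst⟩ := List.mem_map.mp hmem
          have := hvis e he
          rw [hefst] at this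
          exact this ((PySem.Set.mem_add visited (nb, path) (nb, path)).mpr (Or.inr rfl))
        simp only [List.map_append, List.map_cons, List.map_nil]
        rw [List.nodup_append]
        refine ⟨hnd, by simp, ?_⟩
        intro a ha b hb
        rw [List.mem_singleton] at hb
        subst hb
        exact fun hab => hne (hab ▸ ha)
      · intro e he
        rcases List.mem_append.mp he with he | he
        · exact hprop e he
        · simp at he; subst he; exact ⟨h2.1, h2.2, rfl⟩
      · intro e he
        rcases List.mem_append.mp he with he | he
        · intro hc
          exact hvis e he ((PySem.Set.mem_add visited (nb, path) (e.1, path)).mpr (Or.inl hc))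
        · simp at he; subst he; exact h3
      · intro s hs
        rcases hvis' s hs with hs' | hs'
        · rcases (PySem.Set.mem_add visited (nb, path) s).mp hs' with h' | h'
          · exact Or.inl h'
          · exact Or.inr (by rw [h'])
        · exact Or.inr hs'

def pvMeasure (start : String) (cycle_nodes : List String)
    (stack : List (String × List String)) : Nat :=
  (stack.map (fun e => pvW cycle_nodes ^ (pvL start cycle_nodes + 1 - e.2.length))).sum

-- the `while stack:` loop of A; the `pvL < path.length` branch is a totality guard only
-- (every reachable path is a duplicate-free list of nodes drawn from start :: cycle_nodes,
-- so the guard never fires on states reachable from the initial stack)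
def pvLoopA (start : String) (graph : List (String × List String)) (cycle_nodes : List String) :
    List (String × List String) → PySem.Set (String × List String) → Option (List String)
  | [], _ => none
  | (node, path) :: rest, visited =>
    if hg : pvL start cycle_nodes < path.length then none
    else
      match hs : pvScanA start cycle_nodes path
          ((PySem.List.sorted (pvAdj graph node) (fun x => x) false).reverse) rest visited with
      | Sum.inl r => some r
      | Sum.inr (stack', visited') => pvLoopA start graph cycle_nodes stack' visited'
termination_by stack _ => pvMeasure start cycle_nodes stack
decreasing_by
  obtain ⟨pushed, hst, hnd, hprop, -, -⟩ := pvScanA_inr start cycle_nodes path _ _ _ _ _ hs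
  subst hst
  have hcnt : pushed.length ≤ pvC cycle_nodes := by
    have hle := pvDedupLen hnd
      (fun x hx => by
        obtain ⟨e, he, hefst⟩ := List.mem_map.mp hx
        exact hefst ▸ (hprop e he).1)
    simpa [pvC] using hle
  have hplen : path.length ≤ pvL start cycle_nodes := Nat.not_lt.mp hg
  simp only [pvMeasure, List.map_append, List.sum_append, List.map_cons, List.sum_cons]
  have hrepl : pushed.map (fun e => pvW cycle_nodes ^ (pvL start cycle_nodes + 1 - e.2.length))
      = List.replicate pushed.length
        (pvW cycle_nodes ^ (pvL start cycle_nodes - path.length)) := by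
    have hlen : (pushed.map (fun e => pvW cycle_nodes ^ (pvL start cycle_nodes + 1 - e.2.length))).length = pushed.length := by simp
    rw [← hlen]
    apply List.eq_replicate_of_mem
    intro b hb
    obtain ⟨e, he, hee⟩ := List.mem_map.mp hb
    have h2 := (hprop e he).2.2
    rw [← hee, h2]
    congr 1
    simp only [h2, List.length_append, List.length_cons, List.length_nil]
    omega
  rw [hrepl, List.sum_replicate, smul_eq_mul]
  have hkey : pushed.length * pvW cycle_nodes ^ (pvL start cycle_nodes - path.length)
      < pvW cycle_nodes ^ (pvL start cycle_nodes + 1 - path.length) := by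
    have hsucc : pvL start cycle_nodes + 1 - path.length
        = (pvL start cycle_nodes - path.length) + 1 := by omega
    rw [hsucc, pow_succ]
    have hpos : 0 < pvW cycle_nodes ^ (pvL start cycle_nodes - path.length) :=
      pow_pos (by simp [pvW]) _
    calc pushed.length * pvW cycle_nodes ^ (pvL start cycle_nodes - path.length)
        < pvW cycle_nodes * pvW cycle_nodes ^ (pvL start cycle_nodes - path.length) := by
          apply Nat.mul_lt_mul_of_lt_of_le _ (le_refl _) hpos
          simp only [pvW]; omega
      _ = _ := by ring
  omega

def find_lex_cycle_from_py (start : String) (graph : List (String × List String))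
    (cycle_nodes : List String) : Option (List String) :=
  if start ∈ pvAdj graph start then some [start, start]
  else pvLoopA start graph cycle_nodes [(start, [start])] PySem.Set.empty

-- ===== PORT B =====
lemma pvCardLem (cycle_nodes path : List String) (nb : String)
    (h1 : nb ∈ cycle_nodes) (h2 : nb ∉ path) :
    pvC cycle_nodes + 1 - (((path ++ [nb]).toFinset ∩ cycle_nodes.toFinset).card)
      < pvC cycle_nodes + 1 - ((path.toFinset ∩ cycle_nodes.toFinset).card) := by
  have hC := pvDedupCard cycle_nodes
  have hk : (path.toFinset ∩ cycle_nodes.toFinset).card ≤ cycle_nodes.toFinset.card :=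
    Finset.card_le_card Finset.inter_subset_right
  have hins : (path ++ [nb]).toFinset = insert nb path.toFinset := by
    simp [List.toFinset_append]
  have hmem : nb ∈ cycle_nodes.toFinset := by simp [h1]
  have h3 : (path ++ [nb]).toFinset ∩ cycle_nodes.toFinset
      = insert nb (path.toFinset ∩ cycle_nodes.toFinset) := by
    rw [hins, Finset.insert_inter_of_mem hmem]
  have h4 : nb ∉ path.toFinset ∩ cycle_nodes.toFinset := by simp [h2]
  rw [pvC, hC, h3, Finset.card_insert_of_notMem h4]
  omega

mutual
-- dfs(node, path) of B
def pvDfsB (start : String) (graph : List (String × List String)) (cycle_nodes : List String)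
    (node : String) (path : List String) : Option (List String) :=
  let nbrs := PySem.List.sorted (PySem.Set.ofList (pvAdj graph node)) (fun x => x) false
  if start ∈ nbrs ∧ 1 < path.length then some (path ++ [start])
  else pvGoB start graph cycle_nodes nbrs path
termination_by (pvC cycle_nodes + 1 - (path.toFinset ∩ cycle_nodes.toFinset).card,
    (PySem.List.sorted (PySem.Set.ofList (pvAdj graph node)) (fun x => x) false).length + 1)
decreasing_by exact Prod.Lex.right _ (Nat.lt_succ_self _)

-- the `for nb in nbrs:` loop of dfs, returning the first non-None recursive result
def pvGoB (start : String) (graph : List (String × List String)) (cycle_nodes : List String)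
    (worklist : List String) (path : List String) : Option (List String) :=
  match worklist with
  | [] => none
  | nb :: rest =>
    if h : nb ∈ cycle_nodes ∧ nb ∉ path then
      match pvDfsB start graph cycle_nodes nb (path ++ [nb]) with
      | some res => some res
      | none => pvGoB start graph cycle_nodes rest path
    else pvGoB start graph cycle_nodes rest path
termination_by (pvC cycle_nodes + 1 - (path.toFinset ∩ cycle_nodes.toFinset).card, worklist.length)
decreasing_by
  · exact Prod.Lex.left _ _ (pvCardLem cycle_nodes path nb h.1 h.2)
  · exact Prod.Lex.right _ (Nat.lt_succ_self _)
  · exact Prod.Lex.right _ (Nat.lt_succ_self _)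
end

def find_lex_cycle_from_py_alt (start : String) (graph : List (String × List String))
    (cycle_nodes : List String) : Option (List String) :=
  if start ∈ pvAdj graph start then some [start, start]
  else pvDfsB start graph cycle_nodes start [start]

-- ===== PRECONDITION & SPEC =====
def Spec_find_lex_cycle_from_py (start : String) (graph : List (String × List String)) (cycle_nodes : List String) (out : Option (List String)) : Prop := out = find_lex_cycle_from_py_alt start graph cycle_nodes
instance (start : String) (graph : List (String × List String)) (cycle_nodes : List String) (out : Option (List String)) : Decidable (Spec_find_lex_cycle_from_py start graph cycle_nodes out) := by unfold Spec_find_lex_cycle_from_py; infer_instance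

-- ===== CLAIM (what is proved, stated in full; the proofs are below) =====
def Claim_equal_find_lex_cycle_from_py : Prop := ∀ (start : String) (graph : List (String × List String)) (cycle_nodes : List String), Dom_find_lex_cycle_from_py start graph cycle_nodes → Spec_find_lex_cycle_from_py start graph cycle_nodes (find_lex_cycle_from_py start graph cycle_nodes)

-- ===== LEMMAS AND PROOFS =====

lemma pvDedupCons (nb : String) (l : List String) :
    PySem.List.dedup (nb :: l) = nb :: (PySem.List.dedup l).filter (fun y => y ≠ nb) := by
  rw [PySem.List.dedup_eq_ofList, show (nb :: l) = [nb] ++ l from rfl, PySem.Set.ofList_append]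
  rw [show PySem.Set.ofList [nb] = [nb] from rfl, PySem.Set.update_eq_append_filter]
  rw [PySem.List.dedup_eq_ofList]
  simp [PySem.Set.contains]

lemma pvDedupSublist (l : List String) : (PySem.List.dedup l).Sublist l := by
  induction l with
  | nil => simp [PySem.List.dedup, PySem.Set.ofList]
  | cons a t ih =>
    rw [pvDedupCons]
    exact List.Sublist.cons₂ a ((List.filter_sublist).trans ih)

-- the eligible strictly-sorted neighbor list, as B computes it
lemma pvChildVals (adj cycle_nodes path : List String) :
    (PySem.List.dedup (((PySem.List.sorted adj (fun x => x) false).reverse).filter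
        (fun nb => decide (nb ∈ cycle_nodes ∧ nb ∉ path)))).reverse
    = (PySem.List.sorted (PySem.Set.ofList adj) (fun x => x) false).filter
        (fun nb => decide (nb ∈ cycle_nodes ∧ nb ∉ path)) := by
  have hndL : (PySem.List.dedup (((PySem.List.sorted adj (fun x => x) false).reverse).filter
      (fun nb => decide (nb ∈ cycle_nodes ∧ nb ∉ path)))).reverse.Nodup := by
    rw [List.nodup_reverse]
    rw [PySem.List.dedup_eq_ofList]
    exact PySem.Set.nodup_ofList _
  have hndR : ((PySem.List.sorted (PySem.Set.ofList adj) (fun x => x) false).filter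
      (fun nb => decide (nb ∈ cycle_nodes ∧ nb ∉ path))).Nodup := by
    apply List.Nodup.filter
    exact ((PySem.List.sorted_perm _ _ _).nodup_iff).mpr (PySem.Set.nodup_ofList _)
  have hperm : (PySem.List.dedup (((PySem.List.sorted adj (fun x => x) false).reverse).filter
      (fun nb => decide (nb ∈ cycle_nodes ∧ nb ∉ path)))).reverse.Perm
      ((PySem.List.sorted (PySem.Set.ofList adj) (fun x => x) false).filter
      (fun nb => decide (nb ∈ cycle_nodes ∧ nb ∉ path))) := by
    rw [List.perm_ext_iff_of_nodup hndL hndR]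
    intro a
    rw [List.mem_reverse, PySem.List.dedup_eq_ofList, PySem.Set.mem_ofList]
    simp [PySem.List.mem_sorted, PySem.Set.mem_ofList]
  have hpwL : List.Pairwise (· < ·) (PySem.List.dedup (((PySem.List.sorted adj (fun x => x) false).reverse).filter
      (fun nb => decide (nb ∈ cycle_nodes ∧ nb ∉ path)))).reverse := by
    rw [List.pairwise_reverse]
    have h1 : List.Pairwise (fun a b : String => b ≤ a)
        ((PySem.List.sorted adj (fun x => x) false).reverse) := by
      rw [List.pairwise_reverse]
      exact PySem.List.sorted_pairwise adj (fun x => x)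
    have h2 := h1.filter (fun nb => decide (nb ∈ cycle_nodes ∧ nb ∉ path))
    have h3 := h2.sublist (pvDedupSublist _)
    have hnd : (PySem.List.dedup (((PySem.List.sorted adj (fun x => x) false).reverse).filter
        (fun nb => decide (nb ∈ cycle_nodes ∧ nb ∉ path)))).Nodup := by
      rw [PySem.List.dedup_eq_ofList]; exact PySem.Set.nodup_ofList _
    have := h3.and hnd
    exact this.imp (fun {a b} hab => lt_of_le_of_ne hab.1 (Ne.symm hab.2))
  have hpwR : List.Pairwise (· < ·) ((PySem.List.sorted (PySem.Set.ofList adj) (fun x => x) false).filter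
      (fun nb => decide (nb ∈ cycle_nodes ∧ nb ∉ path))) :=
    (PySem.List.sorted_ofList_pairwise_lt adj).filter _
  exact hperm.eq_of_pairwise (fun a b _ _ h1 h2 => absurd h2 (lt_asymm h1)) hpwL hpwR

lemma pvSetAddApp {x : String × List String} {s : PySem.Set (String × List String)}
    (h : x ∉ s) : PySem.Set.add s x = s ++ [x] := by
  simp [PySem.Set.add, PySem.Set.contains, h]

-- the sequence of nodes A pushes while scanning one neighbor list
def pvPushes (cycle_nodes path : List String) :
    PySem.Set (String × List String) → List String → List String
  | _, [] => []
  | visited, nb :: rest =>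
    if (nb ∈ cycle_nodes ∧ nb ∉ path) ∧ (nb, path) ∉ visited then
      nb :: pvPushes cycle_nodes path (visited ++ [(nb, path)]) rest
    else pvPushes cycle_nodes path visited rest

lemma pvScanA_early (start : String) (cycle_nodes path : List String) (hlen : 1 < path.length) :
    ∀ (lst : List String) stack visited, start ∈ lst →
      pvScanA start cycle_nodes path lst stack visited = Sum.inl (path ++ [start]) := by
  intro lst
  induction lst with
  | nil => intro stack visited h; simp at h
  | cons nb rest ih =>
    intro stack visited h
    simp only [pvScanA]
    by_cases h1 : nb = start ∧ 1 < path.length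
    · rw [if_pos h1]
    · rw [if_neg h1]
      have hrest : start ∈ rest := by
        rcases List.mem_cons.mp h with h' | h'
        · exact absurd ⟨h'.symm, hlen⟩ h1
        · exact h'
      by_cases h2 : nb ∈ cycle_nodes ∧ nb ∉ path
      · rw [if_pos h2]
        by_cases h3 : (nb, path) ∈ visited
        · rw [if_pos h3]; exact ih _ _ hrest
        · rw [if_neg h3]; exact ih _ _ hrest
      · rw [if_neg h2]; exact ih _ _ hrest

lemma pvScanA_run' (start : String) (cycle_nodes path : List String) :
    ∀ (lst : List String) stack visited, ¬ (start ∈ lst ∧ 1 < path.length) →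
      ∃ visited', pvScanA start cycle_nodes path lst stack visited =
        Sum.inr (((pvPushes cycle_nodes path visited lst).map
          (fun nb => (nb, path ++ [nb]))).reverse ++ stack, visited') := by
  intro lst
  induction lst with
  | nil => intro stack visited _; exact ⟨visited, by simp [pvScanA, pvPushes]⟩
  | cons nb rest ih =>
    intro stack visited h
    have h1 : ¬ (nb = start ∧ 1 < path.length) := by
      rintro ⟨rfl, hlen⟩; exact h ⟨List.mem_cons_self, hlen⟩
    have hrest : ¬ (start ∈ rest ∧ 1 < path.length) := by
      rintro ⟨hm, hlen⟩; exact h ⟨List.mem_cons_of_mem _ hm, hlen⟩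
    simp only [pvScanA, pvPushes]
    rw [if_neg h1]
    by_cases h2 : nb ∈ cycle_nodes ∧ nb ∉ path
    · rw [if_pos h2]
      by_cases h3 : (nb, path) ∈ visited
      · rw [if_pos h3, if_neg (by simp [h3])]
        exact ih stack visited hrest
      · rw [if_neg h3, if_pos ⟨h2, h3⟩]
        obtain ⟨v', hv'⟩ := ih ((nb, path ++ [nb]) :: stack) (PySem.Set.add visited (nb, path)) hrest
        refine ⟨v', ?_⟩
        rw [hv', pvSetAddApp h3]
        simp [List.append_assoc]
    · rw [if_neg h2, if_neg (fun hc => h2 hc.1)]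
      exact ih stack visited hrest

lemma pvPushesDedup (cycle_nodes path : List String) :
    ∀ (lst : List String) (visited : PySem.Set (String × List String)),
      pvPushes cycle_nodes path visited lst =
        (PySem.List.dedup (lst.filter (fun nb => decide (nb ∈ cycle_nodes ∧ nb ∉ path)))).filter
          (fun y => decide ((y, path) ∉ visited)) := by
  intro lst
  induction lst with
  | nil => intro visited; simp [pvPushes, PySem.List.dedup, PySem.Set.ofList]
  | cons nb rest ih =>
    intro visited
    simp only [pvPushes]
    by_cases h2 : nb ∈ cycle_nodes ∧ nb ∉ path
    · have hF : (nb :: rest).filter (fun nb => decide (nb ∈ cycle_nodes ∧ nb ∉ path))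
          = nb :: rest.filter (fun nb => decide (nb ∈ cycle_nodes ∧ nb ∉ path)) := by
        rw [List.filter_cons, if_pos (by simpa using h2)]
      rw [hF, pvDedupCons]
      by_cases h3 : (nb, path) ∈ visited
      · rw [if_neg (by rintro ⟨-, hc⟩; exact hc h3)]
        rw [List.filter_cons, if_neg (by simp [h3])]
        rw [ih visited, List.filter_filter]
        apply List.filter_congr
        intro y hy
        by_cases hyn : y = nb
        · subst hyn; simp [h3]
        · simp [hyn]
      · rw [if_pos ⟨h2, h3⟩, List.filter_cons, if_pos (by simp [h3])]
        congr 1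
        rw [ih (visited ++ [(nb, path)]), List.filter_filter]
        apply List.filter_congr
        intro y hy
        by_cases hyn : y = nb
        · subst hyn; simp
        · simp [hyn]
    · have hF : (nb :: rest).filter (fun nb => decide (nb ∈ cycle_nodes ∧ nb ∉ path))
          = rest.filter (fun nb => decide (nb ∈ cycle_nodes ∧ nb ∉ path)) := by
        rw [List.filter_cons, if_neg (by simpa using h2)]
      rw [hF, if_neg (fun hc => h2 hc.1)]
      exact ih visited

lemma pvGoB_eq (start : String) (graph : List (String × List String)) (cycle_nodes : List String)
    (path : List String) :
    ∀ lst, pvGoB start graph cycle_nodes lst path =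
      lst.findSome? (fun nb => if nb ∈ cycle_nodes ∧ nb ∉ path
        then pvDfsB start graph cycle_nodes nb (path ++ [nb]) else none) := by
  intro lst
  induction lst with
  | nil => rw [pvGoB.eq_def]; simp
  | cons nb rest ih =>
    rw [pvGoB.eq_def]
    simp only [List.findSome?_cons]
    by_cases h : nb ∈ cycle_nodes ∧ nb ∉ path
    · rw [dif_pos h, if_pos h]
      cases pvDfsB start graph cycle_nodes nb (path ++ [nb]) <;> simp [ih]
    · rw [dif_neg h, if_neg h]
      simp [ih]

lemma pvFindSomeFilter (cycle_nodes path : List String) (f : String → Option (List String)) :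
    ∀ l : List String,
      ((l.filter (fun nb => decide (nb ∈ cycle_nodes ∧ nb ∉ path))).findSome? f)
        = l.findSome? (fun nb => if nb ∈ cycle_nodes ∧ nb ∉ path then f nb else none) := by
  intro l
  induction l with
  | nil => simp
  | cons a t ih =>
    rw [List.filter_cons]
    by_cases h : a ∈ cycle_nodes ∧ a ∉ path
    · rw [if_pos (by simpa using h), List.findSome?_cons, List.findSome?_cons, if_pos h, ih]
    · rw [if_neg (by simpa using h), ih, List.findSome?_cons]
      simp [h]


lemma pvLoopA_nil (start : String) (graph : List (String × List String))
    (cycle_nodes : List String) (visited : PySem.Set (String × List String)) :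
    pvLoopA start graph cycle_nodes [] visited = none := by
  rw [pvLoopA.eq_def]

lemma pvLoopA_cons_inl (start : String) (graph : List (String × List String))
    (cycle_nodes : List String) (node : String) (path : List String)
    (rest : List (String × List String)) (visited : PySem.Set (String × List String))
    (r : List String) (hg : ¬ pvL start cycle_nodes < path.length)
    (hs : pvScanA start cycle_nodes path
        ((PySem.List.sorted (pvAdj graph node) (fun x => x) false).reverse) rest visited
      = Sum.inl r) :
    pvLoopA start graph cycle_nodes ((node, path) :: rest) visited = some r := by
  rw [pvLoopA.eq_def]
  dsimp only
  rw [dif_neg hg]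
  split
  · next r' heq =>
      rw [hs] at heq
      injection heq with h'
      rw [h']
  · next stack' visited' heq =>
      rw [hs] at heq
      simp at heq

lemma pvLoopA_cons_inr (start : String) (graph : List (String × List String))
    (cycle_nodes : List String) (node : String) (path : List String)
    (rest stack' : List (String × List String))
    (visited visited' : PySem.Set (String × List String))
    (hg : ¬ pvL start cycle_nodes < path.length)
    (hs : pvScanA start cycle_nodes path
        ((PySem.List.sorted (pvAdj graph node) (fun x => x) false).reverse) rest visited
      = Sum.inr (stack', visited')) :
    pvLoopA start graph cycle_nodes ((node, path) :: rest) visited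
      = pvLoopA start graph cycle_nodes stack' visited' := by
  rw [pvLoopA.eq_def]
  dsimp only
  rw [dif_neg hg]
  split
  · next r' heq =>
      rw [hs] at heq
      simp at heq
  · next stack'' visited'' heq =>
      rw [hs] at heq
      injection heq with h'
      injection h' with hX hV
      rw [hX, hV]

lemma pvMainLemma (start : String) (graph : List (String × List String))
    (cycle_nodes : List String) :
    ∀ stack visited,
      (∀ e ∈ stack, e.2.Nodup ∧ (∀ x ∈ e.2, x ∈ start :: cycle_nodes) ∧ start ∈ e.2) →
      stack.Pairwise (fun a b => ¬ a.2 <+: b.2 ∧ ¬ b.2 <+: a.2) →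
      (∀ s ∈ visited, ∀ e ∈ stack, ¬ e.2 <+: s.2) →
      pvLoopA start graph cycle_nodes stack visited =
        stack.findSome? (fun e => pvDfsB start graph cycle_nodes e.1 e.2) := by
  intro stack visited
  induction stack, visited using pvLoopA.induct start graph cycle_nodes with
  | case1 visited =>
    intro _ _ _
    rw [pvLoopA_nil]
    simp
  | case2 node path rest visited hg =>
    intro h1 _ _
    exfalso
    have hhead := h1 (node, path) List.mem_cons_self
    have hlen : path.length ≤ pvL start cycle_nodes :=
      pvDedupLen hhead.1 hhead.2.1
    omega
  | case3 node path rest visited hg r hs =>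
    intro h1 h2 h3
    by_cases he : start ∈ (PySem.List.sorted (pvAdj graph node) (fun x => x) false).reverse
        ∧ 1 < path.length
    · have hE := pvScanA_early start cycle_nodes path he.2 _ rest visited he.1
      rw [pvLoopA_cons_inl start graph cycle_nodes node path rest visited _ hg hE]
      have hdfs : pvDfsB start graph cycle_nodes node path = some (path ++ [start]) := by
        rw [pvDfsB.eq_def]
        rw [if_pos ?_]
        refine ⟨?_, he.2⟩
        have := he.1
        rw [List.mem_reverse, PySem.List.mem_sorted] at this
        simp only [PySem.List.mem_sorted, PySem.Set.mem_ofList]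
        exact this
      rw [List.findSome?_cons, hdfs]
    · have hv0 : ∀ x : String, (x, path) ∉ visited :=
        fun x hx => (h3 (x, path) hx (node, path) List.mem_cons_self) (List.prefix_refl path)
      obtain ⟨v', hv'⟩ := pvScanA_run' start cycle_nodes path _ rest visited he
      rw [hv'] at hs
      simp at hs
  | case4 node path rest visited hg stack' visited' hs IH =>
    intro h1 h2 h3
    have hhead := h1 (node, path) List.mem_cons_self
    have h2' := List.pairwise_cons.mp h2
    have hv0 : ∀ x : String, (x, path) ∉ visited :=
      fun x hx => (h3 (x, path) hx (node, path) List.mem_cons_self) (List.prefix_refl path)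
    have hne : ¬ (start ∈ (PySem.List.sorted (pvAdj graph node) (fun x => x) false).reverse
        ∧ 1 < path.length) := by
      intro hcon
      have hE := pvScanA_early start cycle_nodes path hcon.2 _ rest visited hcon.1
      rw [hE] at hs
      simp at hs
    obtain ⟨v', hv'⟩ := pvScanA_run' start cycle_nodes path _ rest visited hne
    rw [hv'] at hs
    injection hs with hpair
    injection hpair with hX hV
    subst hX
    subst hV
    have hpush : pvPushes cycle_nodes path visited
        ((PySem.List.sorted (pvAdj graph node) (fun x => x) false).reverse)
        = PySem.List.dedup (((PySem.List.sorted (pvAdj graph node) (fun x => x) false).reverse).filter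
            (fun nb => decide (nb ∈ cycle_nodes ∧ nb ∉ path))) := by
      rw [pvPushesDedup]
      apply List.filter_eq_self.mpr
      intro y hy
      simpa using hv0 y
    have hvals := pvChildVals (pvAdj graph node) cycle_nodes path
    have hchild : ((pvPushes cycle_nodes path visited
        ((PySem.List.sorted (pvAdj graph node) (fun x => x) false).reverse)).map
          (fun nb => (nb, path ++ [nb]))).reverse
        = ((PySem.List.sorted (PySem.Set.ofList (pvAdj graph node)) (fun x => x) false).filter
            (fun nb => decide (nb ∈ cycle_nodes ∧ nb ∉ path))).map (fun nb => (nb, path ++ [nb])) := by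
      rw [← List.map_reverse, hpush, hvals]
    have heligB_nd : ((PySem.List.sorted (PySem.Set.ofList (pvAdj graph node)) (fun x => x) false).filter
        (fun nb => decide (nb ∈ cycle_nodes ∧ nb ∉ path))).Nodup :=
      List.Nodup.filter _ (((PySem.List.sorted_perm _ _ _).nodup_iff).mpr (PySem.Set.nodup_ofList _))
    have heligB_mem : ∀ nb ∈ (PySem.List.sorted (PySem.Set.ofList (pvAdj graph node)) (fun x => x) false).filter
        (fun nb => decide (nb ∈ cycle_nodes ∧ nb ∉ path)), nb ∈ cycle_nodes ∧ nb ∉ path := by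
      intro nb h
      have := List.of_mem_filter h
      simpa using this
    have hInv1 : ∀ e ∈ ((pvPushes cycle_nodes path visited
        ((PySem.List.sorted (pvAdj graph node) (fun x => x) false).reverse)).map
          (fun nb => (nb, path ++ [nb]))).reverse ++ rest,
        e.2.Nodup ∧ (∀ x ∈ e.2, x ∈ start :: cycle_nodes) ∧ start ∈ e.2 := by
      rw [hchild]
      intro e he
      rcases List.mem_append.mp he with he | he
      · obtain ⟨nb, hnb, rfl⟩ := List.mem_map.mp he
        obtain ⟨hnbc, hnbp⟩ := heligB_mem nb hnb
        refine ⟨?_, ?_, ?_⟩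
        · rw [List.nodup_append]
          refine ⟨hhead.1, by simp, ?_⟩
          intro a ha b hb
          rw [List.mem_singleton] at hb
          subst hb
          exact fun hab => hnbp (hab ▸ ha)
        · intro x hx
          rcases List.mem_append.mp hx with hx | hx
          · exact hhead.2.1 x hx
          · rw [List.mem_singleton] at hx
            subst hx
            exact List.mem_cons_of_mem _ hnbc
        · exact List.mem_append.mpr (Or.inl hhead.2.2)
      · exact h1 e (List.mem_cons_of_mem _ he)
    have hInv2 : (((pvPushes cycle_nodes path visited
        ((PySem.List.sorted (pvAdj graph node) (fun x => x) false).reverse)).map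
          (fun nb => (nb, path ++ [nb]))).reverse ++ rest).Pairwise
        (fun a b => ¬ a.2 <+: b.2 ∧ ¬ b.2 <+: a.2) := by
      rw [hchild]
      apply List.pairwise_append.mpr
      refine ⟨?_, h2'.2, ?_⟩
      · rw [List.pairwise_map]
        have hpw : ((PySem.List.sorted (PySem.Set.ofList (pvAdj graph node)) (fun x => x) false).filter
            (fun nb => decide (nb ∈ cycle_nodes ∧ nb ∉ path))).Pairwise (· ≠ ·) := heligB_nd
        apply hpw.imp
        intro a b hab
        constructor
        · intro hpre
          exact hab (by
            have := List.append_cancel_left (hpre.eq_of_length (by simp))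
            simpa using this)
        · intro hpre
          exact hab (by
            have := List.append_cancel_left (hpre.eq_of_length (by simp)).symm
            simpa using this)
      · intro a ha b hb
        obtain ⟨nb, hnb, rfl⟩ := List.mem_map.mp ha
        have hrel := h2'.1 b hb
        constructor
        · intro hpre
          exact hrel.1 ((List.prefix_append path [nb]).trans hpre)
        · intro hpre
          rcases List.prefix_concat_iff.mp hpre with hpre | hpre
          · exact hrel.1 (hpre ▸ List.prefix_append path [nb])
          · exact hrel.2 hpre
    have hInv3 : ∀ s ∈ v', ∀ e ∈ ((pvPushes cycle_nodes path visited
        ((PySem.List.sorted (pvAdj graph node) (fun x => x) false).reverse)).map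
          (fun nb => (nb, path ++ [nb]))).reverse ++ rest, ¬ e.2 <+: s.2 := by
      obtain ⟨pushed, -, -, -, -, hvis'⟩ :=
        pvScanA_inr start cycle_nodes path _ rest visited _ _ hv'
      intro s hsv e he
      rw [hchild] at he
      have hsv' : s ∈ visited ∨ s.2 = path := hvis' s hsv
      rcases List.mem_append.mp he with he | he
      · obtain ⟨nb, hnb, rfl⟩ := List.mem_map.mp he
        rcases hsv' with hsv' | hsv'
        · intro hpre
          exact (h3 s hsv' (node, path) List.mem_cons_self)
            ((List.prefix_append path [nb]).trans hpre)
        · intro hpre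
          have := hpre.length_le
          rw [hsv'] at this
          simp at this
      · rcases hsv' with hsv' | hsv'
        · exact h3 s hsv' e (List.mem_cons_of_mem _ he)
        · rw [hsv']
          exact (h2'.1 e he).2
    have hIH := IH hInv1 hInv2 hInv3
    rw [pvLoopA_cons_inr start graph cycle_nodes node path rest _ visited v' hg hv', hIH]
    have hdfs : pvDfsB start graph cycle_nodes node path
        = List.findSome? (fun e => pvDfsB start graph cycle_nodes e.1 e.2)
            (((PySem.List.sorted (PySem.Set.ofList (pvAdj graph node)) (fun x => x) false).filter
              (fun nb => decide (nb ∈ cycle_nodes ∧ nb ∉ path))).map (fun nb => (nb, path ++ [nb]))) := by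
      rw [pvDfsB.eq_def]
      have hcond : ¬ (start ∈ PySem.List.sorted (PySem.Set.ofList (pvAdj graph node)) (fun x => x) false
          ∧ 1 < path.length) := by
        intro hcon
        apply hne
        refine ⟨?_, hcon.2⟩
        have := hcon.1
        rw [PySem.List.mem_sorted, PySem.Set.mem_ofList] at this
        rw [List.mem_reverse, PySem.List.mem_sorted]
        exact this
      rw [if_neg hcond, pvGoB_eq, ← pvFindSomeFilter, List.findSome?_map]
      rfl
    rw [hchild, List.findSome?_append, List.findSome?_cons, hdfs]
    cases List.findSome? (fun e => pvDfsB start graph cycle_nodes e.1 e.2)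
        (((PySem.List.sorted (PySem.Set.ofList (pvAdj graph node)) (fun x => x) false).filter
          (fun nb => decide (nb ∈ cycle_nodes ∧ nb ∉ path))).map (fun nb => (nb, path ++ [nb]))) <;>
      simp

-- ===== VERDICT (by name: the statement is the Claim_ definition above) =====
theorem find_lex_cycle_from_py_spec : Claim_equal_find_lex_cycle_from_py := by
  intro start graph cycle_nodes _
  unfold Spec_find_lex_cycle_from_py find_lex_cycle_from_py find_lex_cycle_from_py_alt
  by_cases h : start ∈ pvAdj graph start
  · simp [h]
  · simp only [h, if_false]
    rw [pvMainLemma start graph cycle_nodes [(start, [start])] PySem.Set.empty]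
    · cases hd : pvDfsB start graph cycle_nodes start [start] <;>
        simp [List.findSome?_cons, hd]
    · intro e he; simp at he; subst he; exact ⟨by simp, by simp, by simp⟩
    · simp
    · intro s hs; simp [PySem.Set.empty] at hs
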